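-- pv_equiv track=rewrite | github.com/nclabteam/FedProC | utils/analysis.py | filter_experiments
-- ===== SOURCE A (Python) =====
-- def filter_experiments(
--     experiments, models=None, strategies=None, datasets=None, experiments_filter=None
-- ):
--     filtered = experiments
--     if models:
--         filtered = [exp for exp in filtered if exp.get("model", "unknown") in models]
--     if strategies:
--         filtered = [
--             exp for exp in filtered if exp.get("strategy", "unknown") in strategies
--         ]
--     if datasets:
--         filtered = [
--             exp for exp in filtered if exp.get("dataset", "unknown") in datasets
--         ]
--     if experiments_filter:
--         filtered = [
--             exp
--             for exp in filtered
--             if exp.get("experiment_name", "") in experiments_filter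
--         ]
--     return filtered
-- ===== SOURCE B (Python) =====
-- def filter_experiments(
--     experiments, models=None, strategies=None, datasets=None, experiments_filter=None
-- ):
--     criteria = (
--         (models, "model", "unknown"),
--         (strategies, "strategy", "unknown"),
--         (datasets, "dataset", "unknown"),
--         (experiments_filter, "experiment_name", ""),
--     )
--     keep = set(range(len(experiments)))
--     for allowed, key, default in criteria:
--         if allowed:
--             keep &= {
--                 i for i in keep if experiments[i].get(key, default) in allowed
--             }
--     return [experiments[i] for i in sorted(keep)]
-- ===== Notes on version B (the rewrite author's own statement) =====
-- stated objective: alternative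
-- what changed: Replaces A's four hard-coded sequential list-rebuilding passes with a table-driven loop over (filter, key, default) criteria that intersects a set of surviving indices, then reconstructs the output by indexing the original list at the sorted surviving indices.
import Mathlib
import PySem

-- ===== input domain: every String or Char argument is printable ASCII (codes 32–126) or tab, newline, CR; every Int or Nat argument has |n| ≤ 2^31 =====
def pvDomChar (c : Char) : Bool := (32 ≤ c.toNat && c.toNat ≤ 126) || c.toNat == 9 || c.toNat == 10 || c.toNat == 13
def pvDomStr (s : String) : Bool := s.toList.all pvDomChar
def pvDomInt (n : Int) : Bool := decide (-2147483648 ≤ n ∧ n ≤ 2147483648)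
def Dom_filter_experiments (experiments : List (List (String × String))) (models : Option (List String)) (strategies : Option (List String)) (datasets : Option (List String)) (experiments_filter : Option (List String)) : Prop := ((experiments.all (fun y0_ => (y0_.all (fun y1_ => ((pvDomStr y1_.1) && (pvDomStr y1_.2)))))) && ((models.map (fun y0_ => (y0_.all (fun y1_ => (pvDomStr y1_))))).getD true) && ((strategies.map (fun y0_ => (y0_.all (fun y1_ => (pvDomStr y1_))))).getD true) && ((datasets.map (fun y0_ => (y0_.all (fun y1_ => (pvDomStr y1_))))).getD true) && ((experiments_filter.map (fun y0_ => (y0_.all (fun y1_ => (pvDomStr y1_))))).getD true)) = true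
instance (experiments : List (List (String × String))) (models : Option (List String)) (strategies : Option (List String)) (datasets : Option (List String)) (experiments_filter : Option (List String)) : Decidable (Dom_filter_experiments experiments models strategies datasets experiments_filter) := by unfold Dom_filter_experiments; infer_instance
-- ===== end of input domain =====

-- B replaces A's four hard-coded sequential filter passes with a table-driven intersection of
-- surviving-index sets plus reconstruction by sorted indexing (objective: alternative); values
-- agree everywhere, list identity/sharing is not modelled.

-- ===== PORT A =====
-- exp.get(key, dflt) on a dict modelled as an association list (first match)
def pyDictGetD (exp : List (String × String)) (k dflt : String) : String :=
  match exp.find? (fun p => p.1 == k) with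
  | some p => p.2
  | none => dflt

-- Python truthiness of an Optional[list]: 'if xs:' is true iff xs is a non-empty list
def pyTruthy (o : Option (List String)) : Bool :=
  match o with
  | some l => !l.isEmpty
  | none => false

def filter_experiments (experiments : List (List (String × String))) (models : Option (List String)) (strategies : Option (List String)) (datasets : Option (List String)) (experiments_filter : Option (List String)) : List (List (String × String)) :=
  let filtered := experiments
  let filtered := if pyTruthy models then
      filtered.filter (fun exp => (models.getD []).contains (pyDictGetD exp "model" "unknown"))
    else filtered
  let filtered := if pyTruthy strategies then
      filtered.filter (fun exp => (strategies.getD []).contains (pyDictGetD exp "strategy" "unknown"))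
    else filtered
  let filtered := if pyTruthy datasets then
      filtered.filter (fun exp => (datasets.getD []).contains (pyDictGetD exp "dataset" "unknown"))
    else filtered
  let filtered := if pyTruthy experiments_filter then
      filtered.filter (fun exp => (experiments_filter.getD []).contains (pyDictGetD exp "experiment_name" ""))
    else filtered
  filtered

-- ===== PORT B =====
-- the criteria table: (allowed values, dict key, default)
def pvCriteria (models strategies datasets experiments_filter : Option (List String)) : List (Option (List String) × String × String) :=
  [(models, "model", "unknown"), (strategies, "strategy", "unknown"),
   (datasets, "dataset", "unknown"), (experiments_filter, "experiment_name", "")]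

def filter_experiments_alt (experiments : List (List (String × String))) (models : Option (List String)) (strategies : Option (List String)) (datasets : Option (List String)) (experiments_filter : Option (List String)) : List (List (String × String)) :=
  -- keep: the set of surviving indices (distinct Nats; PySem set convention), intersected per criterion
  let keep := (pvCriteria models strategies datasets experiments_filter).foldl
    (fun keep c =>
      if pyTruthy c.1 then
        keep.filter (fun i => (c.1.getD []).contains (pyDictGetD (experiments[i]?.getD []) c.2.1 c.2.2))
      else keep)
    (List.range experiments.length)
  -- sorted(keep), then reconstruct by indexing
  ((keep.mergeSort (· ≤ ·)).map (fun i => experiments[i]?.getD []))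

-- ===== PRECONDITION & SPEC =====
def Spec_filter_experiments (experiments : List (List (String × String))) (models : Option (List String)) (strategies : Option (List String)) (datasets : Option (List String)) (experiments_filter : Option (List String)) (out : List (List (String × String))) : Prop := out = filter_experiments_alt experiments models strategies datasets experiments_filter
instance (experiments : List (List (String × String))) (models : Option (List String)) (strategies : Option (List String)) (datasets : Option (List String)) (experiments_filter : Option (List String)) (out : List (List (String × String))) : Decidable (Spec_filter_experiments experiments models strategies datasets experiments_filter out) := by unfold Spec_filter_experiments; infer_instance

-- ===== CLAIM (what is proved, stated in full; the proofs are below) =====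
def Claim_equal_filter_experiments : Prop := ∀ (experiments : List (List (String × String))) (models : Option (List String)) (strategies : Option (List String)) (datasets : Option (List String)) (experiments_filter : Option (List String)), Dom_filter_experiments experiments models strategies datasets experiments_filter → Spec_filter_experiments experiments models strategies datasets experiments_filter (filter_experiments experiments models strategies datasets experiments_filter)

-- ===== LEMMAS AND PROOFS =====

-- the per-criterion predicate, on elements
def pvElemPred (c : Option (List String) × String × String) (exp : List (String × String)) : Bool :=
  !pyTruthy c.1 || (c.1.getD []).contains (pyDictGetD exp c.2.1 c.2.2)

-- the fold over the criteria table filters the index list by the conjunction of all criteria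
theorem foldl_keep_eq (experiments : List (List (String × String)))
    (cs : List (Option (List String) × String × String)) (keep : List Nat) :
    cs.foldl
      (fun keep c =>
        if pyTruthy c.1 then
          keep.filter (fun i => (c.1.getD []).contains (pyDictGetD (experiments[i]?.getD []) c.2.1 c.2.2))
        else keep) keep
    = keep.filter (fun i => cs.all (fun c => pvElemPred c (experiments[i]?.getD []))) := by
  induction cs generalizing keep with
  | nil => simp
  | cons c cs ih =>
    simp only [List.foldl_cons, List.all_cons]
    by_cases hc : pyTruthy c.1 = true
    · rw [if_pos hc, ih, List.filter_filter]
      apply List.filter_congr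
      intro i _
      simp [pvElemPred, hc, Bool.and_comm]
    · rw [if_neg hc, ih]
      apply List.filter_congr
      intro i _
      simp [pvElemPred, hc]

-- reconstructing by index equals filtering the list
theorem range_filter_map_eq_filter (xs : List (List (String × String)))
    (q : List (String × String) → Bool) :
    ((List.range xs.length).filter (fun i => q (xs[i]?.getD []))).map (fun i => xs[i]?.getD [])
      = xs.filter q := by
  induction xs with
  | nil => simp
  | cons x xs ih =>
    rw [List.length_cons, List.range_succ_eq_map]
    simp only [List.filter_cons, List.filter_map]
    have h1 : ∀ (i : Nat), ((x :: xs)[i+1]?).getD ([] : List (String × String)) = (xs[i]?).getD [] := by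
      intro i; simp
    by_cases hq : q x = true
    · simp only [List.getElem?_cons_zero, Option.getD_some, hq, if_pos]
      simp only [Function.comp_def, h1]
      simp [← ih, Function.comp_def]
    · simp only [List.getElem?_cons_zero, Option.getD_some, hq]
      simp only [Function.comp_def, h1]
      simp [← ih, Function.comp_def]

-- ===== VERDICT (by name: the statement is the Claim_ definition above) =====
theorem filter_experiments_spec : Claim_equal_filter_experiments := by
  intro experiments models strategies datasets experiments_filter _
  show filter_experiments _ _ _ _ _ = _
  simp only [filter_experiments, filter_experiments_alt]
  rw [foldl_keep_eq]
  have hsorted : ((List.range experiments.length).filter (fun i =>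
      (pvCriteria models strategies datasets experiments_filter).all
        (fun c => pvElemPred c (experiments[i]?.getD [])))).mergeSort (· ≤ ·)
    = (List.range experiments.length).filter (fun i =>
      (pvCriteria models strategies datasets experiments_filter).all
        (fun c => pvElemPred c (experiments[i]?.getD []))) := by
    apply List.mergeSort_of_sorted
    exact ((List.pairwise_lt_range).filter _).imp (fun h => by simp [Nat.le_of_lt h])
  rw [hsorted]
  rw [range_filter_map_eq_filter experiments
      (fun exp => (pvCriteria models strategies datasets experiments_filter).all
        (fun c => pvElemPred c exp))]
  cases hm : pyTruthy models <;> cases hs : pyTruthy strategies <;>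
    cases hd : pyTruthy datasets <;> cases he : pyTruthy experiments_filter <;>
    simp [pvCriteria, pvElemPred, hm, hs, hd, he, List.filter_filter,
      Bool.and_comm, Bool.and_left_comm, Bool.and_assoc]
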